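-- pv_equiv track=rewrite | github.com/Yudeeswaran/resume_extraction | extraction.py | format_resume_text
-- ===== SOURCE A (Python) =====
-- def format_resume_text(raw_text):
--     # Split the text into lines for easier manipulation
--     lines = raw_text.split('\n')
--
--     # Initialize structured output
--     resume_data = {
--         "Section": [],
--         "Content": []
--     }
--
--     # Initialize flags for different sections
--     current_section = None
--
--     for line in lines:
--         # Clean up empty lines
--         if line.strip() == "":
--             continue
--
--         # Detect common sections by keywords and format them
--         line_lower = line.lower()  # Convert line to lower case for comparison
--
--         # Check for section headers
--         if 'skills' in line_lower and current_section != 'Skills':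
--             current_section = 'Skills'
--             resume_data["Section"].append(current_section)
--             resume_data["Content"].append("")  # Prepare to collect content
--             continue
--         elif 'interests' in line_lower and current_section != 'Interests':
--             current_section = 'Interests'
--             resume_data["Section"].append(current_section)
--             resume_data["Content"].append("")  # Prepare to collect content
--             continue
--         elif 'education' in line_lower and current_section != 'Education':
--             current_section = 'Education'
--             resume_data["Section"].append(current_section)
--             resume_data["Content"].append("")  # Prepare to collect content
--             continue
--         elif 'industrial project' in line_lower and current_section != 'Industrial Project':
--             current_section = 'Industrial Project'
--             resume_data["Section"].append(current_section)
--             resume_data["Content"].append("")  # Prepare to collect content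
--             continue
--         elif 'achievements' in line_lower and current_section != 'Achievements':
--             current_section = 'Achievements'
--             resume_data["Section"].append(current_section)
--             resume_data["Content"].append("")  # Prepare to collect content
--             continue
--         elif 'organization' in line_lower and current_section != 'Organization':
--             current_section = 'Organization'
--             resume_data["Section"].append(current_section)
--             resume_data["Content"].append("")  # Prepare to collect content
--             continue
--         elif 'certificates' in line_lower and current_section != 'Certificates':
--             current_section = 'Certificates'
--             resume_data["Section"].append(current_section)
--             resume_data["Content"].append("")  # Prepare to collect content
--             continue
--         elif 'projects' in line_lower and current_section != 'Projects':
--             current_section = 'Projects'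
--             resume_data["Section"].append(current_section)
--             resume_data["Content"].append("")  # Prepare to collect content
--             continue
--
--         # Append the line to the appropriate section content
--         if current_section:
--             resume_data["Content"][-1] += line.strip() + "\n"
--
--     return resume_data
-- ===== SOURCE B (Python) =====
-- SECTIONS = [('skills', 'Skills'), ('interests', 'Interests'),
--             ('education', 'Education'), ('industrial project', 'Industrial Project'),
--             ('achievements', 'Achievements'), ('organization', 'Organization'),
--             ('certificates', 'Certificates'), ('projects', 'Projects')]
--
--
-- def format_resume_text(raw_text):
--     # Pass 1: classify each non-blank line as a header event or a body event.
--     events = []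
--     current = None
--     for line in raw_text.split('\n'):
--         if not line.strip():
--             continue
--         low = line.lower()
--         sec = next((s for k, s in SECTIONS if k in low and current != s), None)
--         if sec is not None:
--             current = sec
--             events.append((True, sec))
--         elif current is not None:
--             events.append((False, line.strip()))
--     # Pass 2: group body events under the preceding header.
--     groups = []
--     for is_header, text in events:
--         if is_header:
--             groups.append((text, []))
--         else:
--             groups[-1][1].append(text)
--     return {"Section": [s for s, _ in groups],
--             "Content": ["".join(t + "\n" for t in body) for _, body in groups]}
-- ===== Notes on version B (the rewrite author's own statement) =====
-- stated objective: simpler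
-- what changed: A's 8-branch elif chain with in-place dict mutation is replaced by a keyword table scanned per line and a two-pass decomposition: classify non-blank lines into header/body events, then group bodies under the preceding header and join them.
import Mathlib
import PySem

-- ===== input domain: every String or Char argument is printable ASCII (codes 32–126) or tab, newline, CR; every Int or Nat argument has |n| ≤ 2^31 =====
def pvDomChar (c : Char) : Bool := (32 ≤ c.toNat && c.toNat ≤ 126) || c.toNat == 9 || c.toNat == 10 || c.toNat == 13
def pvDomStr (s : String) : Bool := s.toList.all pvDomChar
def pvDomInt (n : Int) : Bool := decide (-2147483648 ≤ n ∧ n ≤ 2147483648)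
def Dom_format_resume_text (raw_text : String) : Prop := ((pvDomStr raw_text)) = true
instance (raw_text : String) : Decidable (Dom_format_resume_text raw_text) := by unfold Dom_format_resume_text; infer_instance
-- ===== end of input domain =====

-- B replaces A's 8-branch elif chain and in-place dict mutation by a keyword table plus a
-- two-pass decomposition (classify lines into header/body events, then group); objective: simpler.

-- ===== PORT A =====

-- Content[-1] += s; the [] case is unreachable in A (a section is always opened first).
def pvAppendLast : List String → String → List String
  | [], _ => []
  | [x], s => [x ++ s]
  | x :: xs, s => x :: pvAppendLast xs s

-- loop body of A: state = (current_section, Section list, Content list)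
def pvStepA (st : Option String × List String × List String) (line : String) :
    Option String × List String × List String :=
  if PySem.Str.strip line = "" then st
  else
    let low := PySem.Str.lower line
    if PySem.Str.isIn "skills" low ∧ st.1 ≠ some "Skills" then
      (some "Skills", st.2.1 ++ ["Skills"], st.2.2 ++ [""])
    else if PySem.Str.isIn "interests" low ∧ st.1 ≠ some "Interests" then
      (some "Interests", st.2.1 ++ ["Interests"], st.2.2 ++ [""])
    else if PySem.Str.isIn "education" low ∧ st.1 ≠ some "Education" then
      (some "Education", st.2.1 ++ ["Education"], st.2.2 ++ [""])
    else if PySem.Str.isIn "industrial project" low ∧ st.1 ≠ some "Industrial Project" then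
      (some "Industrial Project", st.2.1 ++ ["Industrial Project"], st.2.2 ++ [""])
    else if PySem.Str.isIn "achievements" low ∧ st.1 ≠ some "Achievements" then
      (some "Achievements", st.2.1 ++ ["Achievements"], st.2.2 ++ [""])
    else if PySem.Str.isIn "organization" low ∧ st.1 ≠ some "Organization" then
      (some "Organization", st.2.1 ++ ["Organization"], st.2.2 ++ [""])
    else if PySem.Str.isIn "certificates" low ∧ st.1 ≠ some "Certificates" then
      (some "Certificates", st.2.1 ++ ["Certificates"], st.2.2 ++ [""])
    else if PySem.Str.isIn "projects" low ∧ st.1 ≠ some "Projects" then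
      (some "Projects", st.2.1 ++ ["Projects"], st.2.2 ++ [""])
    else
      match st.1 with
      | some _ => (st.1, st.2.1, pvAppendLast st.2.2 (PySem.Str.strip line ++ "\n"))
      | none => st

def format_resume_text (raw_text : String) : List (String × List String) :=
  -- the separator "\n" is nonempty, so split? is always `some`; getD [] is unreachable
  let lines := (PySem.Str.split? raw_text "\n").getD []
  let fin := lines.foldl pvStepA (none, [], [])
  [("Section", fin.2.1), ("Content", fin.2.2)]

-- ===== PORT B =====

def pvSECTIONS : List (String × String) :=
  [("skills", "Skills"), ("interests", "Interests"), ("education", "Education"),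
   ("industrial project", "Industrial Project"), ("achievements", "Achievements"),
   ("organization", "Organization"), ("certificates", "Certificates"),
   ("projects", "Projects")]

-- next((s for k, s in SECTIONS if k in low and current != s), None)
def pvFindSec (cur : Option String) (low : String) : List (String × String) → Option String
  | [] => none
  | (k, s) :: rest =>
    if PySem.Str.isIn k low ∧ cur ≠ some s then some s else pvFindSec cur low rest

-- pass 1 loop body: state = (current, events)
def pvStepB (st : Option String × List (Bool × String)) (line : String) :
    Option String × List (Bool × String) :=
  if PySem.Str.strip line = "" then st
  else
    let low := PySem.Str.lower line
    match pvFindSec st.1 low pvSECTIONS with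
    | some s => (some s, st.2 ++ [(true, s)])
    | none =>
      match st.1 with
      | some _ => (st.1, st.2 ++ [(false, PySem.Str.strip line)])
      | none => st

-- groups[-1][1].append(t); the [] case is unreachable (a body event follows a header event).
def pvAppendLastSnd : List (String × List String) → String → List (String × List String)
  | [], _ => []
  | [(s, b)], t => [(s, b ++ [t])]
  | g :: gs, t => g :: pvAppendLastSnd gs t

-- pass 2 loop body
def pvGroupStep (gs : List (String × List String)) : Bool × String → List (String × List String)
  | (true, s) => gs ++ [(s, [])]
  | (false, t) => pvAppendLastSnd gs t

def format_resume_text_alt (raw_text : String) : List (String × List String) :=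
  -- the separator "\n" is nonempty, so split? is always `some`; getD [] is unreachable
  let events := (((PySem.Str.split? raw_text "\n").getD []).foldl pvStepB (none, [])).2
  let groups := events.foldl pvGroupStep []
  [("Section", groups.map Prod.fst),
   ("Content", groups.map (fun g => PySem.Str.join "" (g.2.map (· ++ "\n"))))]

-- ===== PRECONDITION & SPEC =====
def Spec_format_resume_text (raw_text : String) (out : List (String × List String)) : Prop := out = format_resume_text_alt raw_text
instance (raw_text : String) (out : List (String × List String)) : Decidable (Spec_format_resume_text raw_text out) := by unfold Spec_format_resume_text; infer_instance

-- ===== CLAIM (what is proved, stated in full; the proofs are below) =====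
def Claim_equal_format_resume_text : Prop := ∀ (raw_text : String), Dom_format_resume_text raw_text → Spec_format_resume_text raw_text (format_resume_text raw_text)

-- ===== LEMMAS AND PROOFS =====

def pvJoinNL (body : List String) : String := PySem.Str.join "" (body.map (· ++ "\n"))

theorem pv_interc_nil (l : List (List Char)) : ([] : List Char).intercalate l = l.flatten := by
  induction l with
  | nil => simp [List.intercalate]
  | cons a t ih =>
    cases t with
    | nil => simp [List.intercalate]
    | cons b u => simp_all [List.intercalate, List.intersperse]

theorem pv_join_append_one (l : List String) (x : String) :
    PySem.Str.join "" (l ++ [x]) = PySem.Str.join "" l ++ x := by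
  simp [PySem.Str.join, PySem.Chars.join, pv_interc_nil]

theorem pvJoinNL_append (b : List String) (t : String) :
    pvJoinNL (b ++ [t]) = pvJoinNL b ++ (t ++ "\n") := by
  simp only [pvJoinNL, List.map_append, List.map_cons, List.map_nil]
  exact pv_join_append_one _ _

theorem pv_map_fst_appendLastSnd (gs : List (String × List String)) (t : String) :
    (pvAppendLastSnd gs t).map Prod.fst = gs.map Prod.fst := by
  induction gs with
  | nil => rfl
  | cons g rest ih =>
    cases rest with
    | nil => cases g; rfl
    | cons h u => simpa [pvAppendLastSnd] using ih

theorem pv_map_join_appendLastSnd (gs : List (String × List String)) (t : String) :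
    (pvAppendLastSnd gs t).map (fun g => pvJoinNL g.2)
      = pvAppendLast (gs.map (fun g => pvJoinNL g.2)) (t ++ "\n") := by
  induction gs with
  | nil => rfl
  | cons g rest ih =>
    cases rest with
    | nil => cases g; simp [pvAppendLastSnd, pvAppendLast, pvJoinNL_append]
    | cons h u => simpa [pvAppendLastSnd, pvAppendLast] using ih

-- the invariant tying A's state to B's pass-1 state through pass-2 grouping
def pvInv (a : Option String × List String × List String)
    (b : Option String × List (Bool × String)) : Prop :=
  a.1 = b.1 ∧ a.2.1 = (b.2.foldl pvGroupStep []).map Prod.fst ∧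
    a.2.2 = (b.2.foldl pvGroupStep []).map (fun g => pvJoinNL g.2)

theorem pvJoinNL_nil : pvJoinNL [] = "" := by
  simp [pvJoinNL, PySem.Str.join, PySem.Chars.join, List.intercalate]

theorem pvStep_inv (a : Option String × List String × List String)
    (b : Option String × List (Bool × String)) (line : String) (h : pvInv a b) :
    pvInv (pvStepA a line) (pvStepB b line) := by
  obtain ⟨h1, h2, h3⟩ := h
  by_cases hs : PySem.Str.strip line = ""
  · simpa [pvStepA, pvStepB, hs] using ⟨h1, h2, h3⟩
  · simp only [pvStepA, pvStepB, if_neg hs, pvFindSec, pvSECTIONS, h1]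
    split_ifs
    all_goals
      first
        | (refine ⟨rfl, ?_, ?_⟩ <;>
            simp [List.foldl_append, pvGroupStep, h2, h3, pvJoinNL_nil])
        | (cases hb : b.1 with
            | none => simp_all [pvInv]
            | some s =>
              refine ⟨rfl, ?_, ?_⟩
              · simp [List.foldl_append, pvGroupStep, pv_map_fst_appendLastSnd, h2]
              · simp [List.foldl_append, pvGroupStep, pv_map_join_appendLastSnd, h3])

theorem pvFold_inv (lines : List String) (a : Option String × List String × List String)
    (b : Option String × List (Bool × String)) (h : pvInv a b) :
    pvInv (lines.foldl pvStepA a) (lines.foldl pvStepB b) := by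
  induction lines generalizing a b with
  | nil => exact h
  | cons l rest ih => exact ih _ _ (pvStep_inv a b l h)

-- ===== VERDICT (by name: the statement is the Claim_ definition above) =====
theorem format_resume_text_spec : Claim_equal_format_resume_text := by
  intro raw _
  unfold Spec_format_resume_text format_resume_text format_resume_text_alt
  have h := pvFold_inv ((PySem.Str.split? raw "\n").getD []) (none, [], []) (none, [])
    ⟨rfl, rfl, rfl⟩
  obtain ⟨_, h2, h3⟩ := h
  simp only [h2, h3, pvJoinNL]
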